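-- pv_equiv track=rewrite | github.com/Sharon131/masters_project | python_tests/test1.py | count_cummulative
-- ===== SOURCE A (Python) =====
-- from collections import Counter
--
-- def count_cummulative(freqs: Counter):
--     cum = dict()
--     items = sorted(freqs.items(), key=lambda x: x[1])
--     prev_key = items[0][0]
--     cum[prev_key] = 0
--     for item in items:
--         key = item[0]
--         if key != prev_key:
--             cum[key] = cum[prev_key] + freqs[prev_key]
--             prev_key = key
--
--     return cum
-- ===== SOURCE B (Python) =====
-- from collections import Counter
--
--
-- def count_cummulative(freqs: Counter):
--     remaining = list(freqs.items())
--     total = sum(v for _, v in remaining)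
--     cum = {}
--     while remaining:
--         k, v = min(remaining, key=lambda x: x[1])
--         cum[k] = total - sum(w for _, w in remaining)
--         remaining.remove((k, v))
--     return cum
-- ===== Notes on version B (the rewrite author's own statement) =====
-- stated objective: alternative
-- what changed: Replaces sort-then-running-offset with repeated stable minimum extraction: each step picks min(remaining, key=value), assigns total - sum(remaining) as its offset (complement sums), and removes it from the pool — no sorted() call and no running accumulator or prev_key state.
import Mathlib
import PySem

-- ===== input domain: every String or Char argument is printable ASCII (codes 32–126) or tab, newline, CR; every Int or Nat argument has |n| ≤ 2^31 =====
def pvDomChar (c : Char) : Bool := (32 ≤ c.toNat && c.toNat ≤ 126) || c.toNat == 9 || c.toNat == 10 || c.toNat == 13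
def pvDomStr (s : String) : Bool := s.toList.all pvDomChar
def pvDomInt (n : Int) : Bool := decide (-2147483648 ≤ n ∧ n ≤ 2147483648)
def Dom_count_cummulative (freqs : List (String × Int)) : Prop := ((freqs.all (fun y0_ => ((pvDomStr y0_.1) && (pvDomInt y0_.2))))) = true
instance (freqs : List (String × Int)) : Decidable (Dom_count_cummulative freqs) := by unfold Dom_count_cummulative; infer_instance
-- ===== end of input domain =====

-- B replaces A's sort + prev_key running-offset loop by repeated stable minimum extraction with complement sums (alternative algorithm; return-value equivalence).


-- ===== PORT A =====
-- the body of A's for-loop over the sorted items; state = (cum, prev_key)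
def pvStepA (f : PySem.Dict String Int) (st : PySem.Dict String Int × String)
    (item : String × Int) : PySem.Dict String Int × String :=
  if item.1 ≠ st.2 then
    (st.1.insert item.1 (st.1.getD st.2 0 + f.getD st.2 0), item.1)
  else st

def count_cummulative (freqs : List (String × Int)) : List (String × Int) :=
  let f : PySem.Dict String Int := PySem.Dict.ofList freqs
  let items := PySem.List.sorted f.items (fun x => x.2) false
  -- items[0][0]: IndexError on an empty dict — excluded by Pre_; the default is never used there
  let prev_key := (PySem.List.pyGetD items 0 ("", 0)).1
  let cum : PySem.Dict String Int := PySem.Dict.empty.insert prev_key 0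
  let st := items.foldl (pvStepA f) (cum, prev_key)
  st.1.items

-- ===== PORT B =====
-- B's while loop: pick the first minimum-value item, record total - sum(remaining), remove it.
-- remaining.remove((k, v)) always succeeds here ((k, v) = min of the list, so it is a member);
-- PySem.List.remove? returns some (remaining.erase (k, v)) then (remove?_eq_some_erase), so erase IS that step.
def pvWhileB (total : Int) : Nat → List (String × Int) → PySem.Dict String Int → PySem.Dict String Int
  | 0, _, cum => cum   -- fuel exhausted: only reachable with remaining = [] (each pass removes one element)
  | fuel + 1, remaining, cum =>
    match PySem.List.min? remaining (fun x => x.2) with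
    | none => cum   -- while remaining: — min? = none exactly when remaining is empty
    | some m =>
        pvWhileB total fuel (remaining.erase m)
          (cum.insert m.1 (total - (remaining.map (·.2)).sum))

def count_cummulative_alt (freqs : List (String × Int)) : List (String × Int) :=
  let f : PySem.Dict String Int := PySem.Dict.ofList freqs
  let remaining := f.items
  let total := (remaining.map (·.2)).sum
  (pvWhileB total remaining.length remaining PySem.Dict.empty).items

-- ===== PRECONDITION & SPEC =====
-- Pre_ excludes only the empty input, on which A raises IndexError (items[0]).
def Pre_count_cummulative (freqs : List (String × Int)) : Prop := freqs ≠ []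
instance (freqs : List (String × Int)) : Decidable (Pre_count_cummulative freqs) := by unfold Pre_count_cummulative; infer_instance
def pvWitness_count_cummulative : (List (String × Int)) := [("a", 3), ("b", 1)]

def Spec_count_cummulative (freqs : List (String × Int)) (out : List (String × Int)) : Prop := out = count_cummulative_alt freqs
instance (freqs : List (String × Int)) (out : List (String × Int)) : Decidable (Spec_count_cummulative freqs out) := by unfold Spec_count_cummulative; infer_instance

-- ===== CLAIM (what is proved, stated in full; the proofs are below) =====
def Claim_equal_count_cummulative : Prop := ∀ (freqs : List (String × Int)), Dom_count_cummulative freqs → Pre_count_cummulative freqs → Spec_count_cummulative freqs (count_cummulative freqs)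
-- ===== LEMMAS AND PROOFS =====

-- the association list (kᵢ, S + v₁ + … + vᵢ₋₁) that both programs produce over a run of items
def pvBuild (l : List (String × Int)) (S : Int) : List (String × Int) :=
  match l with
  | [] => []
  | (k, v) :: t => (k, S) :: pvBuild t (S + v)

-- A's loop over fresh, pairwise-distinct keys appends exactly the prefix-sum entries
theorem pvLoopA (f : PySem.Dict String Int) (l : List (String × Int)) :
    ∀ (cum : PySem.Dict String Int) (prev : String) (acc : Int),
    cum.get? prev = some acc →
    (∀ p ∈ l, cum.contains p.1 = false) →
    (l.map (·.1)).Nodup →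
    (∀ p ∈ l, p.1 ≠ prev) →
    (∀ p ∈ l, f.get? p.1 = some p.2) →
    (l.foldl (pvStepA f) (cum, prev)).1.items
      = cum.items ++ pvBuild l (acc + f.getD prev 0) := by
  induction l with
  | nil => intro cum prev acc _ _ _ _ _; simp [pvBuild]
  | cons p t ih =>
    rintro cum prev acc h1 h2 h3 h4 h5
    obtain ⟨k, v⟩ := p
    have hkprev : k ≠ prev := h4 (k, v) (by simp)
    have hkfresh : cum.contains k = false := h2 (k, v) (by simp)
    have hstep : pvStepA f (cum, prev) (k, v)
        = (cum.insert k (acc + f.getD prev 0), k) := by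
      simp [pvStepA, hkprev, PySem.Dict.getD_of_get?_eq_some _ _ h1]
    rw [List.map_cons] at h3
    have hknott : k ∉ t.map (·.1) := (List.nodup_cons.mp h3).1
    have h3' : (t.map (·.1)).Nodup := (List.nodup_cons.mp h3).2
    rw [List.foldl_cons, hstep,
      ih (cum.insert k (acc + f.getD prev 0)) k (acc + f.getD prev 0)
        (PySem.Dict.get?_insert_self _ _ _)
        (by
          intro q hq
          rw [PySem.Dict.contains_insert]
          have hqk : q.1 ≠ k := by
            intro h; exact hknott (h ▸ List.mem_map_of_mem hq)
          simp [hqk, h2 q (List.mem_cons_of_mem _ hq)])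
        h3'
        (by
          intro q hq h
          exact hknott (h ▸ List.mem_map_of_mem hq))
        (fun q hq => h5 q (List.mem_cons_of_mem _ hq))]
    have hfk : f.getD k 0 = v :=
      PySem.Dict.getD_of_get?_eq_some _ _ (h5 (k, v) (by simp))
    rw [PySem.Dict.items_insert_of_not_contains _ _ hkfresh, hfk]
    simp [pvBuild]

-- appending one element to the input appends one stable insertion to the sorted list
theorem pvSortedAppend (l : List (String × Int)) (x : String × Int) :
    PySem.List.sorted (l ++ [x]) (fun p => p.2) false
      = PySem.List.insertBy (fun a b => decide (a.2 < b.2)) x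
          (PySem.List.sorted l (fun p => p.2) false) := by
  rw [PySem.List.sorted_eq_foldl_insertBy, PySem.List.sorted_eq_foldl_insertBy,
    List.foldl_append]
  rfl

-- min? of l ++ [x]: the late element wins only on a strict decrease (first extremal element)
theorem pvMinAppend (l : List (String × Int)) (x : String × Int) :
    PySem.List.min? (l ++ [x]) (fun p => p.2)
      = match PySem.List.min? l (fun p => p.2) with
        | none => some x
        | some m => if x.2 < m.2 then some x else some m := by
  cases hl : PySem.List.min? l (fun p => p.2) with
  | none =>
    have : l = [] := (PySem.List.min?_eq_none_iff l _).mp hl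
    subst this
    rfl
  | some m =>
    simp only [PySem.List.min?] at hl ⊢
    rw [List.foldl_append, hl]
    rfl

-- head of the stable sort = first minimum, and erasing it sorts to the tail
theorem pvSortedHeadErase (r : List (String × Int)) :
    r.Nodup → ∀ (m : String × Int) (t : List (String × Int)),
    PySem.List.sorted r (fun p => p.2) false = m :: t →
    PySem.List.min? r (fun p => p.2) = some m ∧
      PySem.List.sorted (r.erase m) (fun p => p.2) false = t := by
  induction r using List.reverseRecOn with
  | nil => intro _ m t h; simp [PySem.List.sorted] at h
  | append_singleton r' x ih =>
    intro hnd m t h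
    have hnd' : r'.Nodup := (List.nodup_append.mp hnd).1
    have hxnot : x ∉ r' := by
      intro hx
      exact (List.nodup_append.mp hnd).2.2 x hx x (List.mem_singleton_self x) rfl
    rw [pvSortedAppend] at h
    cases hs : PySem.List.sorted r' (fun p => p.2) false with
    | nil =>
      have hr' : r' = [] := (PySem.List.sorted_eq_nil_iff _ _ _).mp hs
      subst hr'
      rw [hs] at h
      rw [show PySem.List.insertBy (fun a b => decide (a.2 < b.2)) x [] = [x] from rfl] at h
      cases h
      constructor
      · simp [PySem.List.min?]
      · simp [PySem.List.sorted]
    | cons m' t' =>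
      obtain ⟨hmin', herase'⟩ := ih hnd' m' t' hs
      have hm'mem : m' ∈ r' := PySem.List.min?_mem hmin'
      rw [hs] at h
      rw [show PySem.List.insertBy (fun a b => decide (a.2 < b.2)) x (m' :: t')
          = if x.2 < m'.2 then x :: m' :: t'
            else m' :: PySem.List.insertBy (fun a b => decide (a.2 < b.2)) x t'
        from by simp [PySem.List.insertBy]] at h
      by_cases hlt : x.2 < m'.2
      · rw [if_pos hlt] at h
        obtain ⟨rfl, rfl⟩ := by simpa using h
        refine ⟨?_, ?_⟩
        · rw [pvMinAppend, hmin']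
          simp [hlt]
        · rw [List.erase_append_right _ hxnot]
          simp [hs]
      · rw [if_neg hlt] at h
        obtain ⟨rfl, rfl⟩ := by simpa using h
        refine ⟨?_, ?_⟩
        · rw [pvMinAppend, hmin']
          simp [hlt]
        · rw [List.erase_append_left _ hm'mem, pvSortedAppend, herase']

-- B's while loop appends the prefix-sum entries of the sorted remaining items
theorem pvLoopB (total : Int) (n : Nat) :
    ∀ (r : List (String × Int)), r.length ≤ n →
    ∀ (cum : PySem.Dict String Int),
    (r.map (·.1)).Nodup →
    (∀ p ∈ r, cum.contains p.1 = false) →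
    (pvWhileB total n r cum).items
      = cum.items ++ pvBuild (PySem.List.sorted r (fun p => p.2) false)
          (total - (r.map (·.2)).sum) := by
  induction n with
  | zero =>
    intro r hlen cum _ _
    have hr : r = [] := List.length_eq_zero_iff.mp (Nat.le_zero.mp hlen)
    subst hr
    simp [pvWhileB, PySem.List.sorted, pvBuild]
  | succ n ih =>
    intro r hlen cum hkeys hfresh
    have hndr : r.Nodup := hkeys.of_map
    cases hs : PySem.List.sorted r (fun p => p.2) false with
    | nil =>
      have hr : r = [] := (PySem.List.sorted_eq_nil_iff _ _ _).mp hs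
      subst hr
      simp [pvWhileB, PySem.List.min?, pvBuild]
    | cons m t =>
      obtain ⟨hmin, herase⟩ := pvSortedHeadErase r hndr m t hs
      have hm : m ∈ r := PySem.List.min?_mem hmin
      rw [show pvWhileB total (n + 1) r cum
          = match PySem.List.min? r (fun x => x.2) with
            | none => cum
            | some m => pvWhileB total n (r.erase m)
                (cum.insert m.1 (total - (r.map (·.2)).sum)) from rfl, hmin]
      show (pvWhileB total n (r.erase m)
          (cum.insert m.1 (total - (r.map (·.2)).sum))).items
        = cum.items ++ pvBuild (m :: t) (total - (r.map (·.2)).sum)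
      have hsub : (r.erase m).Sublist r := List.erase_sublist
      have hkeys' : ((r.erase m).map (·.1)).Nodup := (hsub.map (·.1)).nodup hkeys
      have hmkey : m.1 ∉ (r.erase m).map (·.1) := by
        intro hmem
        obtain ⟨q, hq, hq1⟩ := List.mem_map.mp hmem
        have hqm : q = m := List.inj_on_of_nodup_map hkeys (hsub.mem hq) hm hq1
        exact (List.Nodup.not_mem_erase hndr) (hqm ▸ hq)
      have hlen' : (r.erase m).length ≤ n := by
        have h1 := List.length_erase_of_mem hm
        have h2 : 0 < r.length := List.length_pos_iff.mpr (by rintro rfl; simp at hm)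
        omega
      rw [ih (r.erase m) hlen' _ hkeys'
        (by
          intro q hq
          rw [PySem.Dict.contains_insert]
          have hq1 : q.1 ≠ m.1 := by
            intro h
            exact hmkey (h ▸ List.mem_map_of_mem hq)
          simp [hq1, hfresh q (hsub.mem hq)])]
      have hcontm : cum.contains m.1 = false := hfresh m hm
      rw [PySem.Dict.items_insert_of_not_contains _ _ hcontm, herase]
      have hsum : ((r.erase m).map (·.2)).sum = (r.map (·.2)).sum - m.2 := by
        have hperm : r.Perm (m :: r.erase m) := List.perm_cons_erase hm
        have := (hperm.map (·.2)).sum_eq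
        simp at this
        omega
      obtain ⟨mk, mv⟩ := m
      rw [hsum]
      simp only [pvBuild, List.append_assoc, List.singleton_append]
      ring_nf

-- ===== VERDICT (by name: the statement is the Claim_ definition above) =====
theorem count_cummulative_spec : Claim_equal_count_cummulative := by
  intro freqs _ hpre
  unfold Spec_count_cummulative
  simp only [count_cummulative, count_cummulative_alt]
  set f : PySem.Dict String Int := PySem.Dict.ofList freqs with hf
  have hndk : f.keys.Nodup := PySem.Dict.nodup_keys_ofList freqs
  have hperm : (PySem.List.sorted f.items (fun x => x.2) false).Perm f.items :=
    PySem.List.sorted_perm _ _ _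
  have hnd : ((PySem.List.sorted f.items (fun x => x.2) false).map (·.1)).Nodup := by
    have : f.items.map (·.1) = f.keys := rfl
    exact ((hperm.map (·.1)).nodup_iff).mpr (this ▸ hndk)
  have hlook : ∀ p ∈ PySem.List.sorted f.items (fun x => x.2) false, f.get? p.1 = some p.2 := by
    intro p hp
    have hp' : p ∈ f.items := (PySem.List.mem_sorted _ _ _ _).mp hp
    exact PySem.Dict.get?_of_mem_items f (by simpa using hp') hndk
  have hne : PySem.List.sorted f.items (fun x => x.2) false ≠ [] := by
    rw [Ne, PySem.List.sorted_eq_nil_iff]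
    intro hnil
    obtain ⟨p, r, rfl⟩ := List.exists_cons_of_ne_nil hpre
    have : p.1 ∈ f.keys := by
      have : f.keys = PySem.Set.update (PySem.Dict.empty : PySem.Dict String Int).keys
          (((p :: r) : List (String × Int)).map (·.1)) :=
        PySem.Dict.keys_foldl_insert_key (p :: r) (·.1) (fun _ q => q.2) _
      rw [this]
      simp
    rw [show f.keys = f.items.map (·.1) from rfl, hnil] at this
    simp at this
  obtain ⟨⟨k0, v0⟩, t, hitems⟩ := List.exists_cons_of_ne_nil hne
  -- A side: the sorted fold appends exactly pvBuild of the sorted items from 0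
  rw [hitems]
  have hnd2 := hitems ▸ hnd
  rw [List.map_cons] at hnd2
  have hk0t : k0 ∉ t.map (·.1) := (List.nodup_cons.mp hnd2).1
  have hndt : (t.map (·.1)).Nodup := (List.nodup_cons.mp hnd2).2
  have hlook' := hitems ▸ hlook
  rw [PySem.List.pyGetD_zero_cons]
  have hfirst : pvStepA f ((PySem.Dict.empty.insert k0 0 : PySem.Dict String Int), k0) (k0, v0)
      = ((PySem.Dict.empty.insert k0 0 : PySem.Dict String Int), k0) := by
    simp [pvStepA]
  rw [List.foldl_cons, hfirst,
    pvLoopA f t (PySem.Dict.empty.insert k0 0) k0 0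
      (PySem.Dict.get?_insert_self _ _ _)
      (by
        intro q hq
        rw [PySem.Dict.contains_insert]
        have hqk : q.1 ≠ k0 := fun h => hk0t (h ▸ List.mem_map_of_mem hq)
        simp [hqk, PySem.Dict.contains_empty])
      hndt
      (fun q hq h => hk0t (h ▸ List.mem_map_of_mem hq))
      (fun q hq => hlook' q (List.mem_cons_of_mem _ hq))]
  have hfk0 : f.getD k0 0 = v0 :=
    PySem.Dict.getD_of_get?_eq_some _ _ (hlook' (k0, v0) (by simp))
  rw [PySem.Dict.items_insert_of_not_contains _ _ (PySem.Dict.contains_empty _), hfk0]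
  -- B side: the extraction loop builds pvBuild of the sorted items from total - total = 0
  have hkeys : (f.items.map (·.1)).Nodup := hndk
  rw [pvLoopB ((f.items.map (·.2)).sum) f.items.length f.items le_rfl
    PySem.Dict.empty hkeys (by intro q _; simp [PySem.Dict.contains_empty])]
  rw [hitems]
  simp [pvBuild, show (PySem.Dict.empty : PySem.Dict String Int).items = [] from rfl]
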